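-- pv_equiv track=rewrite | github.com/Buty800/UBA-CS | 25-1C/TDA/practicas/p1.py | pc
-- ===== SOURCE A (Python) =====
-- def pc(w,s):
--
--     def validate(parcial):
--         wp = []
--         sp = []
--         for i,b in enumerate(parcial):
--             if not b: continue
--             for j in range(len(wp)): wp[j]+=w[i]
--             wp.append(w[i])
--             sp.append(s[i])
--
--         for i in range(1,len(wp)):
--             if sp[i-1] < wp[i]: return False
--         return True
--
--     def backtrack(parcial):
--         if not validate(parcial[:]): return 0
--         if len(parcial) == len(w): return parcial.count(1)
--         return max(backtrack(parcial+[1]),backtrack(parcial+[0]))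
--
--     return backtrack([])
-- ===== SOURCE B (Python) =====
-- def pc(w, s):
--     # O(n^2) DP, boxes processed top-down (right to left).  best[c] = the minimum,
--     # over stacks of c boxes from the suffix seen so far in which every box supports
--     # every cumulative load placed on it, of the maximum cumulative weight a box put
--     # below the stack would have to carry (best[0] = 0 is a placeholder).
--     best = [0]
--     for wi, si in zip(reversed(w), reversed(s[:len(w)])):
--         new = [best[0]]
--         for c in range(len(best)):
--             ok = (c == 0 or si >= best[c])
--             m = wi + max(0, best[c])
--             if c + 1 < len(best):
--                 new.append(min(best[c + 1], m) if ok else best[c + 1])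
--             elif ok:
--                 new.append(m)
--         best = new
--     return len(best) - 1
-- ===== Notes on version B (the rewrite author's own statement) =====
-- stated objective: faster
-- what changed: Replaces the exponential validate-every-prefix backtracking over all 0/1 vectors by an O(n^2) dynamic programme that scans the boxes once from the top and keeps, for each stack size, the minimal maximal cumulative load of a feasible stack.
import Mathlib
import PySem

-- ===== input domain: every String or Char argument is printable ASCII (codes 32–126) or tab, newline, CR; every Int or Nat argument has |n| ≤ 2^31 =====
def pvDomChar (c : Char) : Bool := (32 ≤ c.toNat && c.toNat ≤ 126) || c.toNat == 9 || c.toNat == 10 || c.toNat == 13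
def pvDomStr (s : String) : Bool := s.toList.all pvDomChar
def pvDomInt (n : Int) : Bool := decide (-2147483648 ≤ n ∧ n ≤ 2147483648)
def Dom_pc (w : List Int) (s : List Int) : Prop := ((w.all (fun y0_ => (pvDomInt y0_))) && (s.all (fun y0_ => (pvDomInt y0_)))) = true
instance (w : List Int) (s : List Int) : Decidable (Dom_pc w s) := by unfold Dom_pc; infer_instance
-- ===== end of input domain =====

-- B replaces A's exponential backtracking by an O(n^2) dynamic programme over the boxes
-- processed top-down, keeping per stack size the minimal maximal cumulative load.

-- ===== PORT A =====
-- validate's first loop: builds wp (cumulative weights) and sp (strengths) over enumerate(parcial).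
-- Indexing w[i]/s[i] uses PySem.List.pyGetD; inside Pre_pc every index reached is in range.
def pcValGo (w s : List Int) : Nat → List Int → List Int → List Int → List Int × List Int
  | _, [], wp, sp => (wp, sp)
  | i, b :: rest, wp, sp =>
    if b = 0 then pcValGo w s (i+1) rest wp sp         -- `if not b: continue`
    else pcValGo w s (i+1) rest
      (wp.map (fun v => v + PySem.List.pyGetD w (i : Int) 0) ++ [PySem.List.pyGetD w (i : Int) 0])
      (sp ++ [PySem.List.pyGetD s (i : Int) 0])

-- validate's second loop: `for i in range(1,len(wp)): if sp[i-1] < wp[i]: return False`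
-- (indices are in range: len(sp) = len(wp)); early return = `all`.
def pcValidate (w s : List Int) (parcial : List Int) : Bool :=
  let ws := pcValGo w s 0 parcial [] []
  (List.range' 1 (ws.1.length - 1)).all (fun i => !(ws.2.getD (i-1) 0 < ws.1.getD i 0))

-- backtrack, with fuel = len(w) - len(parcial) (the remaining recursion depth; never hits 0 early)
def pcBacktrack (w s : List Int) : Nat → List Int → Int
  | fuel, parcial =>
    if !(pcValidate w s parcial) then 0
    else if parcial.length = w.length then ((parcial.count 1 : Nat) : Int)
    else
      match fuel with
      | 0 => 0
      | f + 1 => max (pcBacktrack w s f (parcial ++ [1])) (pcBacktrack w s f (parcial ++ [0]))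
  termination_by fuel _ => fuel

def pc (w : List Int) (s : List Int) : Int := pcBacktrack w s w.length []

-- ===== PORT B =====
-- inner loop of Source B over c = 0 .. len(best)-1; prev = best[c], the argument list = best[c+1:]
def pcStepGo (wi si : Int) : Nat → Int → List Int → List Int
  | c, prev, [] => if c = 0 || decide (prev ≤ si) then [wi + max 0 prev] else []
  | c, prev, b :: rest =>
    (if c = 0 || decide (prev ≤ si) then min b (wi + max 0 prev) else b)
      :: pcStepGo wi si (c+1) b rest

-- one iteration of the outer loop: new = [best[0]] then the inner loop
def pcStep (wi si : Int) (best : List Int) : List Int :=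
  match best with
  | [] => []
  | b0 :: rest => b0 :: pcStepGo wi si 0 b0 rest

-- `for wi, si in zip(reversed(w), reversed(s[:len(w)]))` then `len(best) - 1`
def pc_alt (w : List Int) (s : List Int) : Int :=
  (((w.reverse.zip (s.take w.length).reverse).foldl
      (fun best p => pcStep p.1 p.2 best) [0]).length : Int) - 1

-- ===== PRECONDITION & SPEC =====
-- Pre_pc excludes exactly the inputs with len(s) < len(w), on which A raises IndexError (s[i]).
def Pre_pc (w : List Int) (s : List Int) : Prop := w.length ≤ s.length
instance (w : List Int) (s : List Int) : Decidable (Pre_pc w s) := by unfold Pre_pc; infer_instance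

def pvWitness_pc : List Int × List Int := ([2, 3, 1], [5, 4, 0])

def Spec_pc (w : List Int) (s : List Int) (out : Int) : Prop := out = pc_alt w s
instance (w : List Int) (s : List Int) (out : Int) : Decidable (Spec_pc w s out) := by unfold Spec_pc; infer_instance

-- ===== CLAIM (what is proved, stated in full; the proofs are below) =====
def Claim_equal_pc : Prop := ∀ (w : List Int) (s : List Int), Dom_pc w s → Pre_pc w s → Spec_pc w s (pc w s)

-- ===== LEMMAS AND PROOFS =====

-- total weight of a stack (list of (weight, strength) pairs, bottom first)
def wsum (l : List (Int × Int)) : Int := (l.map Prod.fst).sum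

-- suffix sums: sufs l = [wsum l, wsum l.tail, …]
def sufs : List (Int × Int) → List Int
  | [] => []
  | x :: r => (x.1 + wsum r) :: sufs r

-- A's validate condition on the chosen stack
def validL : List (Int × Int) → Bool
  | [] => true
  | x :: r => (r.isEmpty || decide (wsum r ≤ x.2)) && validL r

-- maximal cumulative weight over the nonempty prefixes of a stack (0 on [])
def mpre : List (Int × Int) → Int
  | [] => 0
  | x :: r => x.1 + max 0 (mpre r)

-- "every prefix of the stack is valid", recursively from the bottom
def pv : List (Int × Int) → Bool
  | [] => true
  | x :: r => pv r && (r.isEmpty || decide (mpre r ≤ x.2))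

-- the stack selected by a 0/1 vector, reading boxes from index i
def chosen (boxes : List (Int × Int)) : Nat → List Int → List (Int × Int)
  | _, [] => []
  | i, b :: rest => if b = 0 then chosen boxes (i+1) rest else boxes.getD i (0, 0) :: chosen boxes (i+1) rest

-- the value of A's backtracking tree below a node with chosen stack cur and remaining boxes t
def bestExt : List (Int × Int) → List (Int × Int) → Nat
  | cur, [] => cur.length
  | cur, x :: r => max (if validL (cur ++ [x]) then bestExt (cur ++ [x]) r else 0) (bestExt cur r)

-- extensions explored by the tree: every new prefix validates
def extOK : List (Int × Int) → List (Int × Int) → Prop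
  | _, [] => True
  | cur, x :: r => validL (cur ++ [x]) = true ∧ extOK (cur ++ [x]) r

-- ---------- small list facts ----------

lemma getD_cons_len (rest : List Int) : ∀ (b0 : Int), (b0 :: rest).getD rest.length 0 = rest.getLastD b0 := by
  induction rest with
  | nil => intro b0; rfl
  | cons b r ih =>
    intro b0
    rw [List.length_cons, List.getD_cons_succ, ih b, List.getLastD_cons]

lemma sufs_length (l : List (Int × Int)) : (sufs l).length = l.length := by
  induction l with
  | nil => rfl
  | cons x r ih => simp [sufs, ih]

lemma sufs_getD (l : List (Int × Int)) : ∀ i, i < l.length → (sufs l).getD i 0 = wsum (l.drop i) := by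
  induction l with
  | nil => simp
  | cons x r ih =>
    intro i hi
    cases i with
    | zero => simp [sufs, wsum]
    | succ j => simpa [sufs] using ih j (by simpa using hi)

lemma zip_take_len (w : List Int) : ∀ s : List Int, w.zip (s.take w.length) = w.zip s := by
  induction w with
  | nil => simp
  | cons a w ih =>
    intro s
    cases s with
    | nil => simp
    | cons b s => simp [ih]

lemma zip_reverse_eq (a : List Int) : ∀ b : List Int, a.length = b.length →
    a.reverse.zip b.reverse = (a.zip b).reverse := by
  induction a with
  | nil => intro b h; simp [(List.length_eq_zero_iff).mp h.symm]
  | cons x a ih =>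
    intro b h
    cases b with
    | nil => simp at h
    | cons y b =>
      have hl : a.reverse.length = b.reverse.length := by simp at h ⊢; omega
      simp only [List.reverse_cons, List.zip_append hl, ih b (by simpa using h)]
      simp

-- ---------- A side: validate = validL of the chosen stack ----------

lemma chosen_cons_zero (boxes : List (Int × Int)) (i : Nat) (rest : List Int) :
    chosen boxes i (0 :: rest) = chosen boxes (i+1) rest := by simp [chosen]

lemma chosen_length (parcial : List Int) : ∀ (boxes : List (Int × Int)) (i : Nat),
    (∀ b ∈ parcial, b = 0 ∨ b = 1) → (chosen boxes i parcial).length = parcial.count 1 := by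
  induction parcial with
  | nil => intro boxes i _; simp [chosen]
  | cons b rest ih =>
    intro boxes i hb
    rcases hb b (by simp) with rfl | rfl
    · simp [chosen, ih boxes (i+1) (fun x hx => hb x (by simp [hx]))]
    · simp [chosen, ih boxes (i+1) (fun x hx => hb x (by simp [hx]))]

lemma chosen_append (parcial : List Int) : ∀ (boxes : List (Int × Int)) (i : Nat) (b : Int),
    chosen boxes i (parcial ++ [b]) =
      chosen boxes i parcial ++ (if b = 0 then [] else [boxes.getD (i + parcial.length) (0, 0)]) := by
  induction parcial with
  | nil => intro boxes i b; by_cases hb : b = 0 <;> simp [chosen, hb]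
  | cons c rest ih =>
    intro boxes i b
    by_cases hc : c = 0 <;> simp [chosen, hc, ih boxes (i+1) b] <;> ring_nf

lemma pcValGo_spec (w s : List Int) (hws : w.length ≤ s.length) (parcial : List Int) :
    ∀ (i : Nat) (wp sp : List Int),
    i + parcial.length ≤ w.length →
    pcValGo w s i parcial wp sp =
      (wp.map (fun v => v + wsum (chosen (w.zip s) i parcial)) ++ sufs (chosen (w.zip s) i parcial),
       sp ++ (chosen (w.zip s) i parcial).map Prod.snd) := by
  induction parcial with
  | nil => intro i wp sp _; simp [pcValGo, chosen, wsum, sufs]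
  | cons b rest ih =>
    intro i wp sp hlen
    have hiw : i < w.length := by simp at hlen; omega
    have his : i < s.length := by omega
    have hib : i < (w.zip s).length := by simp [List.length_zip]; omega
    have hboxQ : (w.zip s)[i]? = some (w[i], s[i]) := by
      rw [List.getElem?_eq_getElem hib]; simp
    have hboxW : ((w.zip s).getD i (0, 0)).1 = w[i] := by
      simp [List.getD_eq_getElem?_getD, hboxQ]
    have hboxS : ((w.zip s).getD i (0, 0)).2 = s[i] := by
      simp [List.getD_eq_getElem?_getD, hboxQ]
    by_cases hb : b = 0
    · subst hb
      rw [show pcValGo w s i (0 :: rest) wp sp = pcValGo w s (i+1) rest wp sp from by simp [pcValGo],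
        ih (i+1) wp sp (by simp at hlen ⊢; omega), chosen_cons_zero]
    · have hw : PySem.List.pyGetD w (i : Int) 0 = w[i] := by
        rw [PySem.List.pyGetD_natCast, List.getD_eq_getElem _ _ hiw]
      have hs : PySem.List.pyGetD s (i : Int) 0 = s[i] := by
        rw [PySem.List.pyGetD_natCast, List.getD_eq_getElem _ _ his]
      rw [show pcValGo w s i (b :: rest) wp sp = pcValGo w s (i+1) rest
            (wp.map (fun v => v + PySem.List.pyGetD w (i : Int) 0) ++ [PySem.List.pyGetD w (i : Int) 0])
            (sp ++ [PySem.List.pyGetD s (i : Int) 0]) from by simp [pcValGo, hb],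
        ih (i+1) _ _ (by simp at hlen ⊢; omega)]
      rw [show chosen (w.zip s) i (b :: rest) = (w.zip s).getD i (0,0) :: chosen (w.zip s) (i+1) rest from by
            simp [chosen, hb]]
      have hwsum : wsum ((w.zip s).getD i (0,0) :: chosen (w.zip s) (i+1) rest)
          = w[i] + wsum (chosen (w.zip s) (i+1) rest) := by
        simp [wsum, List.getD_eq_getElem?_getD, hboxQ]
      have hsuf : sufs ((w.zip s).getD i (0,0) :: chosen (w.zip s) (i+1) rest)
          = (w[i] + wsum (chosen (w.zip s) (i+1) rest)) :: sufs (chosen (w.zip s) (i+1) rest) := by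
        rw [show sufs ((w.zip s).getD i (0,0) :: chosen (w.zip s) (i+1) rest)
            = (((w.zip s).getD i (0,0)).1 + wsum (chosen (w.zip s) (i+1) rest)) :: sufs (chosen (w.zip s) (i+1) rest) from rfl, hboxW]
      rw [hwsum, hsuf, Prod.ext_iff]
      constructor
      · simp [hw, List.map_map, Function.comp_def, add_assoc]
      · simp [hs, hboxQ, List.getD_eq_getElem?_getD]

lemma validL_iff (l : List (Int × Int)) : validL l = true ↔
    (∀ i, 1 ≤ i → i < l.length → wsum (l.drop i) ≤ (l.map Prod.snd).getD (i-1) 0) := by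
  induction l with
  | nil => simp [validL]
  | cons x r ih =>
    rw [show validL (x :: r) = ((r.isEmpty || decide (wsum r ≤ x.2)) && validL r) from rfl]
    rw [Bool.and_eq_true, ih]
    constructor
    · rintro ⟨h1, h2⟩ i h1i hil
      cases i with
      | zero => omega
      | succ j =>
        cases j with
        | zero =>
          rcases Bool.or_eq_true _ _ |>.mp h1 with he | hle
          · rw [List.isEmpty_iff.mp he] at hil; simp at hil
          · simp only [List.drop_succ_cons, List.drop_zero, List.map_cons]
            exact of_decide_eq_true hle
        | succ k =>
          have := h2 (k+1) (by omega) (by simp at hil ⊢; omega)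
          simpa using this
    · intro h
      constructor
      · cases r with
        | nil => simp
        | cons y r' =>
          have h1 := h 1 le_rfl (by simp)
          simp only [List.drop_succ_cons, List.drop_zero, List.map_cons] at h1
          simp only [List.isEmpty_cons, Bool.false_or, decide_eq_true_eq]
          exact h1
      · intro i h1i hil
        obtain ⟨j, rfl⟩ : ∃ j, i = j + 1 := ⟨i - 1, by omega⟩
        have := h (j+2) (by omega) (by simp at hil ⊢; omega)
        simp only [List.drop_succ_cons, List.map_cons] at this
        simpa using this

lemma range'_all_iff (n : Nat) (P : Nat → Bool) :
    ((List.range' 1 (n - 1)).all P = true) ↔ (∀ i, 1 ≤ i → i < n → P i = true) := by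
  rw [List.all_eq_true]
  constructor
  · intro h i h1 h2; exact h i (List.mem_range'_1.mpr ⟨h1, by omega⟩)
  · intro h i hi
    rcases List.mem_range'_1.mp hi with ⟨h1, h2⟩
    exact h i h1 (by omega)

lemma pcValidate_eq (w s : List Int) (hws : w.length ≤ s.length) (parcial : List Int)
    (hlen : parcial.length ≤ w.length) :
    pcValidate w s parcial = validL (chosen (w.zip s) 0 parcial) := by
  unfold pcValidate
  rw [pcValGo_spec w s hws parcial 0 [] [] (by omega)]
  simp only [List.nil_append, List.map_nil]
  rw [Bool.eq_iff_iff, validL_iff, sufs_length, range'_all_iff]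
  constructor
  · intro h i h1 h2
    have := h i h1 h2
    simp only [sufs_getD _ _ h2] at this
    simpa using this
  · intro h i h1 h2
    simp only [sufs_getD _ _ h2]
    simpa using h i h1 h2

-- ---------- A side: backtracking = the tree value bestExt ----------

lemma bestExt_ge (t : List (Int × Int)) : ∀ cur : List (Int × Int), cur.length ≤ bestExt cur t := by
  induction t with
  | nil => intro cur; simp [bestExt]
  | cons x r ih => intro cur; exact le_trans (ih cur) (le_max_right _ _)

lemma pcBacktrack_eq (w s : List Int) (hws : w.length ≤ s.length) :
    ∀ (fuel : Nat) (parcial : List Int), (∀ b ∈ parcial, b = 0 ∨ b = 1) →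
    parcial.length + fuel = w.length →
    validL (chosen (w.zip s) 0 parcial) = true →
    pcBacktrack w s fuel parcial =
      ((bestExt (chosen (w.zip s) 0 parcial) ((w.zip s).drop parcial.length) : Nat) : Int) := by
  intro fuel
  induction fuel with
  | zero =>
    intro parcial hb hlen hval
    have hlen' : parcial.length = w.length := by simpa using hlen
    rw [pcBacktrack, pcValidate_eq w s hws parcial (by omega), hval]
    rw [show (!true) = false from rfl, if_neg (by simp), if_pos hlen']
    rw [show (w.zip s).drop parcial.length = [] from
        List.drop_eq_nil_iff.mpr (by simp [List.length_zip]; omega)]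
    rw [show bestExt (chosen (w.zip s) 0 parcial) [] = (chosen (w.zip s) 0 parcial).length from rfl,
      chosen_length parcial _ 0 hb]
  | succ f ih =>
    intro parcial hb hlen hval
    have hne : parcial.length ≠ w.length := by omega
    have hk : parcial.length < (w.zip s).length := by simp [List.length_zip]; omega
    have hdrop : (w.zip s).drop parcial.length =
        (w.zip s).getD parcial.length (0,0) :: (w.zip s).drop (parcial.length + 1) := by
      rw [List.drop_eq_getElem_cons hk, List.getD_eq_getElem _ _ hk]
    have hch0 : chosen (w.zip s) 0 (parcial ++ [0]) = chosen (w.zip s) 0 parcial := by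
      rw [chosen_append]; simp
    have hch1 : chosen (w.zip s) 0 (parcial ++ [1]) =
        chosen (w.zip s) 0 parcial ++ [(w.zip s).getD parcial.length (0,0)] := by
      rw [chosen_append]; simp
    have hb0 : ∀ b ∈ parcial ++ [0], b = 0 ∨ b = 1 := by
      intro b hmem
      rcases List.mem_append.mp hmem with h | h
      · exact hb b h
      · left; simpa using h
    have hb1 : ∀ b ∈ parcial ++ [1], b = 0 ∨ b = 1 := by
      intro b hmem
      rcases List.mem_append.mp hmem with h | h
      · exact hb b h
      · right; simpa using h
    have branch0 := ih (parcial ++ [0]) hb0 (by simp; omega) (by rw [hch0]; exact hval)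
    rw [hch0, List.length_append] at branch0
    simp only [List.length_cons, List.length_nil, Nat.zero_add] at branch0
    rw [pcBacktrack, pcValidate_eq w s hws parcial (by omega), hval]
    rw [show (!true) = false from rfl, if_neg (by simp), if_neg hne]
    rw [hdrop]
    rw [show bestExt (chosen (w.zip s) 0 parcial)
          ((w.zip s).getD parcial.length (0,0) :: (w.zip s).drop (parcial.length + 1))
        = max (if validL (chosen (w.zip s) 0 parcial ++ [(w.zip s).getD parcial.length (0,0)])
                then bestExt (chosen (w.zip s) 0 parcial ++ [(w.zip s).getD parcial.length (0,0)])
                        ((w.zip s).drop (parcial.length + 1))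
                else 0)
              (bestExt (chosen (w.zip s) 0 parcial) ((w.zip s).drop (parcial.length + 1))) from rfl]
    by_cases hv1 : validL (chosen (w.zip s) 0 parcial ++ [(w.zip s).getD parcial.length (0,0)]) = true
    · have branch1 := ih (parcial ++ [1]) hb1 (by simp; omega) (by rw [hch1]; exact hv1)
      rw [hch1, List.length_append] at branch1
      simp only [List.length_cons, List.length_nil, Nat.zero_add] at branch1
      rw [branch0, branch1, if_pos hv1, Nat.cast_max]
    · have branch1 : pcBacktrack w s f (parcial ++ [1]) = 0 := by
        have hv1' : validL (chosen (w.zip s) 0 parcial ++ [(w.zip s).getD parcial.length (0,0)]) = false := by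
          rw [← Bool.not_eq_true]; exact hv1
        cases f with
        | zero =>
          rw [pcBacktrack, pcValidate_eq w s hws (parcial ++ [1]) (by simp; omega), hch1, hv1']
          simp
        | succ f2 =>
          rw [pcBacktrack, pcValidate_eq w s hws (parcial ++ [1]) (by simp; omega), hch1, hv1']
          simp
      rw [branch0, branch1, if_neg hv1, Nat.cast_max]
      norm_num

lemma pc_eq_bestExt (w s : List Int) (hws : w.length ≤ s.length) :
    pc w s = ((bestExt [] (w.zip s) : Nat) : Int) := by
  have h := pcBacktrack_eq w s hws w.length [] (by simp) (by simp) (by simp [chosen, validL])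
  simpa [pc, chosen] using h

-- ---------- prefixes: extOK ↔ pv ----------

lemma extOK_iff (e : List (Int × Int)) : ∀ cur, extOK cur e ↔
    (∀ p, p <+: e → p ≠ [] → validL (cur ++ p) = true) := by
  induction e with
  | nil =>
    intro cur
    simp only [extOK, true_iff]
    intro p hp hne
    exact absurd (List.prefix_nil.mp hp) hne
  | cons x r ih =>
    intro cur
    rw [show extOK cur (x :: r) = (validL (cur ++ [x]) = true ∧ extOK (cur ++ [x]) r) from rfl, ih]
    constructor
    · rintro ⟨hv, h⟩ p hp hne
      rcases p with _ | ⟨a, p'⟩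
      · exact absurd rfl hne
      · obtain ⟨heq, hp'⟩ := List.cons_prefix_cons.mp hp
        subst heq
        rcases p' with _ | ⟨b, p''⟩
        · exact hv
        · have := h (b :: p'') hp' (by simp)
          simpa [List.append_assoc] using this
    · intro h
      refine ⟨h [x] (by simp) (by simp), fun p hp hne => ?_⟩
      have := h (x :: p) (by exact List.cons_prefix_cons.mpr ⟨rfl, hp⟩) (by simp)
      simpa [List.append_assoc] using this

lemma mpre_bound (e : List (Int × Int)) : ∀ p, p <+: e → p ≠ [] → wsum p ≤ mpre e := by
  induction e with
  | nil => intro p hp hne; exact absurd (List.prefix_nil.mp hp) hne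
  | cons x r ih =>
    intro p hp hne
    rcases p with _ | ⟨a, p'⟩
    · exact absurd rfl hne
    obtain ⟨heq, hp'⟩ := List.cons_prefix_cons.mp hp
    subst heq
    rw [show wsum (a :: p') = a.1 + wsum p' from by simp [wsum], show mpre (a :: r) = a.1 + max 0 (mpre r) from rfl]
    rcases p' with _ | ⟨b, p''⟩
    · simp [wsum]
    · have := ih (b :: p'') hp' (by simp)
      have h0 : mpre r ≤ max 0 (mpre r) := le_max_right _ _
      omega

lemma mpre_achieved (e : List (Int × Int)) : e ≠ [] → ∃ p, p <+: e ∧ p ≠ [] ∧ wsum p = mpre e := by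
  induction e with
  | nil => intro h; exact absurd rfl h
  | cons x r ih =>
    intro _
    by_cases hr : mpre r ≤ 0
    · refine ⟨[x], ⟨r, rfl⟩, by simp, ?_⟩
      rw [show mpre (x :: r) = x.1 + max 0 (mpre r) from rfl]
      simp [wsum]
      omega
    · have hrne : r ≠ [] := by
        intro h; rw [h] at hr; simp [mpre] at hr
      rcases ih hrne with ⟨p, hp, hne, hw⟩
      refine ⟨x :: p, List.cons_prefix_cons.mpr ⟨rfl, hp⟩, by simp, ?_⟩
      rw [show wsum (x :: p) = x.1 + wsum p from by simp [wsum], show mpre (x :: r) = x.1 + max 0 (mpre r) from rfl]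
      omega

lemma pv_iff (e : List (Int × Int)) : pv e = true ↔ (∀ p, p <+: e → validL p = true) := by
  induction e with
  | nil =>
    simp only [pv, true_iff]
    intro p hp
    rw [List.prefix_nil.mp hp]; rfl
  | cons x r ih =>
    rw [show pv (x :: r) = (pv r && (r.isEmpty || decide (mpre r ≤ x.2))) from rfl, Bool.and_eq_true, ih]
    constructor
    · rintro ⟨h1, h2⟩ p hp
      rcases p with _ | ⟨a, p'⟩
      · rfl
      obtain ⟨heq, hp'⟩ := List.cons_prefix_cons.mp hp
      subst heq
      rw [show validL (a :: p') = ((p'.isEmpty || decide (wsum p' ≤ a.2)) && validL p') from rfl,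
        Bool.and_eq_true]
      refine ⟨?_, h1 p' hp'⟩
      rcases p' with _ | ⟨b, p''⟩
      · simp
      · rcases Bool.or_eq_true _ _ |>.mp h2 with he | hle
        · rcases List.cons_prefix_cons.mp hp with ⟨_, hp2⟩
          rw [List.isEmpty_iff.mp he] at hp2
          exact absurd (List.prefix_nil.mp hp2) (by simp)
        · have h1' := mpre_bound r (b :: p'') hp' (by simp)
          have := of_decide_eq_true hle
          simp only [Bool.or_eq_true, decide_eq_true_eq]
          right; omega
    · intro h
      refine ⟨fun p hp => ?_, ?_⟩
      · have := h (x :: p) (List.cons_prefix_cons.mpr ⟨rfl, hp⟩)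
        rw [show validL (x :: p) = ((p.isEmpty || decide (wsum p ≤ x.2)) && validL p) from rfl,
          Bool.and_eq_true] at this
        exact this.2
      · rcases r with _ | ⟨y, r'⟩
        · simp
        rcases mpre_achieved (y :: r') (by simp) with ⟨p, hp, hne, hw⟩
        have := h (x :: p) (List.cons_prefix_cons.mpr ⟨rfl, hp⟩)
        rw [show validL (x :: p) = ((p.isEmpty || decide (wsum p ≤ x.2)) && validL p) from rfl,
          Bool.and_eq_true] at this
        rcases Bool.or_eq_true _ _ |>.mp this.1 with he | hle
        · exact absurd (List.isEmpty_iff.mp he) hne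
        · have := of_decide_eq_true hle
          simp only [Bool.or_eq_true, decide_eq_true_eq]
          right; omega

lemma extOK_nil_iff (e : List (Int × Int)) : extOK [] e ↔ pv e = true := by
  rw [extOK_iff, pv_iff]
  constructor
  · intro h p hp
    rcases p with _ | ⟨a, p'⟩
    · rfl
    · simpa using h (a :: p') hp (by simp)
  · intro h p hp _
    simpa using h p hp

-- ---------- bestExt: achievability and upper bound ----------

lemma bestExt_achieve (t : List (Int × Int)) : ∀ cur,
    ∃ e, e.Sublist t ∧ extOK cur e ∧ bestExt cur t = cur.length + e.length := by
  induction t with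
  | nil => intro cur; exact ⟨[], List.Sublist.refl _, trivial, by simp [bestExt]⟩
  | cons x r ih =>
    intro cur
    by_cases hv : validL (cur ++ [x]) = true
    · rcases ih (cur ++ [x]) with ⟨e1, hs1, ho1, he1⟩
      rcases ih cur with ⟨e2, hs2, ho2, he2⟩
      rcases Nat.le_total (bestExt (cur ++ [x]) r) (bestExt cur r) with hle | hge
      · refine ⟨e2, hs2.cons x, ho2, ?_⟩
        rw [show bestExt cur (x :: r) = max (if validL (cur ++ [x]) then bestExt (cur ++ [x]) r else 0) (bestExt cur r) from rfl]
        rw [if_pos hv, max_eq_right hle, he2]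
      · refine ⟨x :: e1, (List.cons_sublist_cons).mpr hs1, ⟨hv, ho1⟩, ?_⟩
        rw [show bestExt cur (x :: r) = max (if validL (cur ++ [x]) then bestExt (cur ++ [x]) r else 0) (bestExt cur r) from rfl]
        rw [if_pos hv, max_eq_left hge, he1]
        simp; omega
    · rcases ih cur with ⟨e2, hs2, ho2, he2⟩
      refine ⟨e2, hs2.cons x, ho2, ?_⟩
      rw [show bestExt cur (x :: r) = max (if validL (cur ++ [x]) then bestExt (cur ++ [x]) r else 0) (bestExt cur r) from rfl]
      rw [if_neg hv, max_eq_right (le_trans (Nat.zero_le _) (bestExt_ge r cur)), he2]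

lemma bestExt_bound (t : List (Int × Int)) : ∀ cur e, e.Sublist t → extOK cur e →
    cur.length + e.length ≤ bestExt cur t := by
  induction t with
  | nil =>
    intro cur e hs _
    rw [List.sublist_nil.mp hs]
    simp [bestExt]
  | cons x r ih =>
    intro cur e hs ho
    rcases List.sublist_cons_iff.mp hs with hs' | ⟨e', rfl, hs'⟩
    · exact le_trans (ih cur e hs' ho) (le_max_right _ _)
    · rcases ho with ⟨hv, ho'⟩
      have := ih (cur ++ [x]) e' hs' ho'
      refine le_trans ?_ (le_max_left _ _)
      rw [if_pos hv]
      simp at this ⊢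
      omega



-- ---------- B side: the DP table ----------

def dpt (t : List (Int × Int)) : List Int := t.foldr (fun p best => pcStep p.1 p.2 best) [0]

lemma pc_alt_eq (w s : List Int) (hws : w.length ≤ s.length) :
    pc_alt w s = ((dpt (w.zip s)).length : Int) - 1 := by
  unfold pc_alt dpt
  have hlen : w.length = (s.take w.length).length := by simp; omega
  rw [zip_reverse_eq w (s.take w.length) hlen, List.foldl_reverse, zip_take_len]

lemma stepGo_length (wi si : Int) : ∀ (l : List Int) (c : Nat) (prev : Int),
    (pcStepGo wi si c prev l).length =
      if (c + l.length = 0 ∨ l.getLastD prev ≤ si) then l.length + 1 else l.length := by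
  intro l
  induction l with
  | nil =>
    intro c prev
    rw [show pcStepGo wi si c prev [] =
        (if c = 0 || decide (prev ≤ si) then [wi + max 0 prev] else []) from rfl]
    by_cases h1 : c = 0
    · rw [if_pos (by simp [h1]), if_pos (by simp [h1])]
      rfl
    · by_cases h2 : prev ≤ si
      · rw [if_pos (by simp [h2]), if_pos (by simp [List.getLastD, h2])]
        rfl
      · rw [if_neg (by simp [h1, h2]), if_neg (by simp [List.getLastD, h1, h2])]
  | cons b rest ih =>
    intro c prev
    rw [show pcStepGo wi si c prev (b :: rest) =
        (if c = 0 || decide (prev ≤ si) then min b (wi + max 0 prev) else b)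
          :: pcStepGo wi si (c+1) b rest from rfl]
    rw [List.length_cons, ih (c+1) b, List.getLastD_cons]
    by_cases h2 : rest.getLastD b ≤ si
    · rw [if_pos (Or.inr h2), if_pos (Or.inr h2)]
      simp
    · rw [if_neg (fun hh => hh.elim (fun h => by omega) h2),
        if_neg (fun hh => hh.elim (fun h => by simp at h) h2)]
      simp

lemma stepGo_getD (wi si : Int) : ∀ (l : List Int) (c : Nat) (prev : Int) (j : Nat), j < l.length →
    (pcStepGo wi si c prev l).getD j 0 =
      if (c + j = 0 ∨ (prev :: l).getD j 0 ≤ si)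
        then min (l.getD j 0) (wi + max 0 ((prev :: l).getD j 0))
        else l.getD j 0 := by
  intro l
  induction l with
  | nil => intro c prev j h; simp at h
  | cons b rest ih =>
    intro c prev j hj
    cases j with
    | zero =>
      rw [show pcStepGo wi si c prev (b :: rest) =
          (if c = 0 || decide (prev ≤ si) then min b (wi + max 0 prev) else b)
            :: pcStepGo wi si (c+1) b rest from rfl]
      by_cases h1 : c = 0
      · by_cases h2 : prev ≤ si <;> simp [h1, h2]
      · by_cases h2 : prev ≤ si <;> simp [h1, h2]
    | succ j' =>
      rw [show pcStepGo wi si c prev (b :: rest) =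
          (if c = 0 || decide (prev ≤ si) then min b (wi + max 0 prev) else b)
            :: pcStepGo wi si (c+1) b rest from rfl]
      rw [List.getD_cons_succ, ih (c+1) b j' (by simpa using hj)]
      have hc1 : ¬(c + 1 + j' = 0) := by omega
      have hc2 : ¬(c + (j' + 1) = 0) := by omega
      by_cases h2 : (b :: rest).getD j' 0 ≤ si
      · rw [if_pos (Or.inr h2), if_pos (Or.inr (by simpa using h2))]
        simp
      · rw [if_neg (by tauto), if_neg (fun hh => hh.elim hc2 (fun h => h2 (by simpa using h)))]
        simp

lemma stepGo_getD_last (wi si : Int) : ∀ (l : List Int) (c : Nat) (prev : Int),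
    (c + l.length = 0 ∨ l.getLastD prev ≤ si) →
    (pcStepGo wi si c prev l).getD l.length 0 = wi + max 0 (l.getLastD prev) := by
  intro l
  induction l with
  | nil =>
    intro c prev h
    have hcond : c = 0 ∨ prev ≤ si := by simpa [List.getLastD] using h
    rw [show pcStepGo wi si c prev [] =
        (if c = 0 || decide (prev ≤ si) then [wi + max 0 prev] else []) from rfl,
      if_pos (by rcases hcond with h1 | h2 <;> simp [*])]
    simp [List.getLastD]
  | cons b rest ih =>
    intro c prev h
    rw [show pcStepGo wi si c prev (b :: rest) =
        (if c = 0 || decide (prev ≤ si) then min b (wi + max 0 prev) else b)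
          :: pcStepGo wi si (c+1) b rest from rfl]
    rw [List.length_cons, List.getD_cons_succ, List.getLastD_cons]
    apply ih (c+1) b
    rcases h with h1 | h2
    · exact absurd h1 (by intro hK; simp at hK)
    · rw [List.getLastD_cons] at h2
      exact Or.inr h2

lemma pcStep_length (wi si : Int) (best : List Int) (hne : best ≠ []) :
    (pcStep wi si best).length =
      if (best.length - 1 = 0 ∨ best.getD (best.length - 1) 0 ≤ si)
        then best.length + 1 else best.length := by
  obtain ⟨b0, rest, rfl⟩ : ∃ b0 rest, best = b0 :: rest := by
    cases best with
    | nil => exact absurd rfl hne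
    | cons a l => exact ⟨a, l, rfl⟩
  rw [show pcStep wi si (b0 :: rest) = b0 :: pcStepGo wi si 0 b0 rest from rfl,
    List.length_cons, stepGo_length]
  rw [show (b0 :: rest).length - 1 = rest.length from by simp, getD_cons_len rest b0]
  by_cases h : (rest.length = 0 ∨ rest.getLastD b0 ≤ si)
  · rw [if_pos (by simpa using h), if_pos h]
    simp
  · rw [if_neg (by simpa using h), if_neg h]
    simp

lemma pcStep_ge_length (wi si : Int) (best : List Int) (hne : best ≠ []) :
    best.length ≤ (pcStep wi si best).length := by
  rw [pcStep_length wi si best hne]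
  split_ifs <;> omega

lemma pcStep_getD_zero (wi si : Int) (best : List Int) :
    (pcStep wi si best).getD 0 0 = best.getD 0 0 := by
  cases best with
  | nil => rfl
  | cons b0 rest => rfl

lemma pcStep_getD (wi si : Int) (best : List Int) (j : Nat) (h1 : 1 ≤ j) (h2 : j < best.length) :
    (pcStep wi si best).getD j 0 =
      if (j - 1 = 0 ∨ best.getD (j-1) 0 ≤ si)
        then min (best.getD j 0) (wi + max 0 (best.getD (j-1) 0))
        else best.getD j 0 := by
  obtain ⟨b0, rest, rfl⟩ : ∃ b0 rest, best = b0 :: rest := by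
    cases best with
    | nil => simp at h2
    | cons a l => exact ⟨a, l, rfl⟩
  obtain ⟨j', rfl⟩ : ∃ j', j = j' + 1 := ⟨j - 1, by omega⟩
  rw [show pcStep wi si (b0 :: rest) = b0 :: pcStepGo wi si 0 b0 rest from rfl,
    List.getD_cons_succ, stepGo_getD wi si rest 0 b0 j' (by simp at h2; omega)]
  simp only [Nat.zero_add, Nat.add_sub_cancel, List.getD_cons_succ]

lemma pcStep_getD_top (wi si : Int) (best : List Int) (hne : best ≠ [])
    (hc : best.length - 1 = 0 ∨ best.getD (best.length - 1) 0 ≤ si) :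
    (pcStep wi si best).getD best.length 0 = wi + max 0 (best.getD (best.length - 1) 0) := by
  obtain ⟨b0, rest, rfl⟩ : ∃ b0 rest, best = b0 :: rest := by
    cases best with
    | nil => exact absurd rfl hne
    | cons a l => exact ⟨a, l, rfl⟩
  rw [show (b0 :: rest).length - 1 = rest.length from by simp, getD_cons_len rest b0] at hc ⊢
  rw [show pcStep wi si (b0 :: rest) = b0 :: pcStepGo wi si 0 b0 rest from rfl,
    List.length_cons, List.getD_cons_succ]
  exact stepGo_getD_last wi si rest 0 b0 (by simpa using hc)

-- ---------- B side: the DP invariant ----------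

def Feas (t : List (Int × Int)) (c : Nat) : Prop :=
  ∃ e, e.Sublist t ∧ pv e = true ∧ e.length = c

def DPinv (t : List (Int × Int)) (best : List Int) : Prop :=
  best.getD 0 0 = 0 ∧
  (∀ c : Nat, c < best.length ↔ Feas t c) ∧
  (∀ c : Nat, 1 ≤ c → c < best.length →
    ∃ e, e.Sublist t ∧ pv e = true ∧ e.length = c ∧ mpre e = best.getD c 0) ∧
  (∀ e, e.Sublist t → pv e = true → 1 ≤ e.length → best.getD e.length 0 ≤ mpre e)

lemma pv_cons_iff (x : Int × Int) (e : List (Int × Int)) :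
    pv (x :: e) = true ↔ pv e = true ∧ (e = [] ∨ mpre e ≤ x.2) := by
  rw [show pv (x :: e) = (pv e && (e.isEmpty || decide (mpre e ≤ x.2))) from rfl,
    Bool.and_eq_true, Bool.or_eq_true]
  simp [List.isEmpty_iff]

lemma pv_single (x : Int × Int) : pv [x] = true := by
  rw [pv_cons_iff]
  exact ⟨rfl, Or.inl rfl⟩

lemma mpre_cons (x : Int × Int) (e : List (Int × Int)) : mpre (x :: e) = x.1 + max 0 (mpre e) := rfl

lemma DPinv_nil : DPinv [] [0] := by
  refine ⟨rfl, ?_, ?_, ?_⟩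
  · intro c
    constructor
    · intro hc
      have : c = 0 := by simp at hc; omega
      exact ⟨[], List.nil_sublist _, rfl, by simp [this]⟩
    · rintro ⟨e, hs, _, rfl⟩
      rw [List.sublist_nil.mp hs]
      simp
  · intro c h1 h2
    simp at h2
    omega
  · intro e hs _ h1
    rw [List.sublist_nil.mp hs] at h1
    simp at h1

lemma DPinv_step (x : Int × Int) (t : List (Int × Int)) (best : List Int)
    (h : DPinv t best) : DPinv (x :: t) (pcStep x.1 x.2 best) := by
  obtain ⟨h0, hiff, hach, hbnd⟩ := h
  have hpos : 0 < best.length := (hiff 0).mpr ⟨[], List.nil_sublist _, rfl, rfl⟩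
  have hne : best ≠ [] := by
    intro hE; rw [hE] at hpos; simp at hpos
  have hLle : ∀ e : List (Int × Int), e.Sublist t → pv e = true → e.length < best.length :=
    fun e hs hp => (hiff e.length).mpr ⟨e, hs, hp, rfl⟩
  have hgeL : best.length ≤ (pcStep x.1 x.2 best).length := pcStep_ge_length _ _ _ hne
  have hleL : (pcStep x.1 x.2 best).length ≤ best.length + 1 := by
    rw [pcStep_length _ _ _ hne]; split_ifs <;> omega
  refine ⟨by rw [pcStep_getD_zero]; exact h0, ?_, ?_, ?_⟩
  · intro c
    constructor
    · intro hc
      by_cases hcL : c < best.length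
      · obtain ⟨e, hs, hp, rfl⟩ := (hiff c).mp hcL
        exact ⟨e, hs.cons x, hp, rfl⟩
      · have hcEq : c = best.length := by omega
        have hcond : best.length - 1 = 0 ∨ best.getD (best.length - 1) 0 ≤ x.2 := by
          by_contra hK
          rw [pcStep_length _ _ _ hne, if_neg hK] at hc
          omega
        subst hcEq
        by_cases hL1 : best.length - 1 = 0
        · refine ⟨[x], List.cons_sublist_cons.mpr (List.nil_sublist t), pv_single x, by simp; omega⟩
        · have hcond2 : best.getD (best.length - 1) 0 ≤ x.2 := by tauto
          obtain ⟨e', hs', hp', hlen', hmp'⟩ := hach (best.length - 1) (by omega) (by omega)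
          refine ⟨x :: e', List.cons_sublist_cons.mpr hs', ?_, by simp [hlen']; omega⟩
          rw [pv_cons_iff]
          exact ⟨hp', Or.inr (by rw [hmp']; exact hcond2)⟩
    · rintro ⟨e, hs, hp, rfl⟩
      rcases List.sublist_cons_iff.mp hs with hs' | ⟨e', rfl, hs'⟩
      · exact lt_of_lt_of_le (hLle e hs' hp) hgeL
      · rw [pv_cons_iff] at hp
        obtain ⟨hp', hcond⟩ := hp
        have he'L : e'.length < best.length := hLle e' hs' hp'
        by_cases hcL : e'.length + 1 < best.length
        · have : (x :: e').length = e'.length + 1 := by simp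
          omega
        · have hEq : e'.length + 1 = best.length := by omega
          have hcnd : best.length - 1 = 0 ∨ best.getD (best.length - 1) 0 ≤ x.2 := by
            rcases hcond with rfl | hle
            · left; simp at hEq; omega
            · by_cases hz : e'.length = 0
              · left; omega
              · right
                rw [show best.length - 1 = e'.length from by omega]
                exact le_trans (hbnd e' hs' hp' (by omega)) hle
          rw [pcStep_length _ _ _ hne, if_pos hcnd]
          simp
          omega
  · intro c h1c hcnew
    by_cases hcL : c < best.length
    · rw [pcStep_getD x.1 x.2 best c h1c hcL]
      by_cases hcond : (c - 1 = 0 ∨ best.getD (c-1) 0 ≤ x.2)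
      · rw [if_pos hcond]
        rcases le_total (best.getD c 0) (x.1 + max 0 (best.getD (c-1) 0)) with hmin | hmin
        · obtain ⟨e, hs, hp, hlen, hmp⟩ := hach c h1c hcL
          exact ⟨e, hs.cons x, hp, hlen, by rw [hmp, min_eq_left hmin]⟩
        · by_cases hc1 : c - 1 = 0
          · have hc' : c = 1 := by omega
            refine ⟨[x], List.cons_sublist_cons.mpr (List.nil_sublist t), pv_single x, by simp [hc'], ?_⟩
            rw [mpre_cons, min_eq_right hmin, hc1, h0]
            rfl
          · obtain ⟨e', hs', hp', hlen', hmp'⟩ := hach (c-1) (by omega) (by omega)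
            have hcond2 : best.getD (c-1) 0 ≤ x.2 := by tauto
            refine ⟨x :: e', List.cons_sublist_cons.mpr hs', ?_, by simp [hlen']; omega, ?_⟩
            · rw [pv_cons_iff]
              exact ⟨hp', Or.inr (by rw [hmp']; exact hcond2)⟩
            · rw [mpre_cons, min_eq_right hmin, hmp']
      · rw [if_neg hcond]
        obtain ⟨e, hs, hp, hlen, hmp⟩ := hach c h1c hcL
        exact ⟨e, hs.cons x, hp, hlen, hmp⟩
    · have hcEq : c = best.length := by omega
      have hcond : best.length - 1 = 0 ∨ best.getD (best.length - 1) 0 ≤ x.2 := by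
        by_contra hK
        rw [pcStep_length _ _ _ hne, if_neg hK] at hcnew
        omega
      subst hcEq
      rw [pcStep_getD_top x.1 x.2 best hne hcond]
      by_cases hL1 : best.length - 1 = 0
      · refine ⟨[x], List.cons_sublist_cons.mpr (List.nil_sublist t), pv_single x, by simp; omega, ?_⟩
        rw [mpre_cons, hL1, h0]
        rfl
      · have hcond2 : best.getD (best.length - 1) 0 ≤ x.2 := by tauto
        obtain ⟨e', hs', hp', hlen', hmp'⟩ := hach (best.length - 1) (by omega) (by omega)
        refine ⟨x :: e', List.cons_sublist_cons.mpr hs', ?_, by simp [hlen']; omega, ?_⟩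
        · rw [pv_cons_iff]
          exact ⟨hp', Or.inr (by rw [hmp']; exact hcond2)⟩
        · rw [mpre_cons, hmp']
  · intro e hs hp h1len
    rcases List.sublist_cons_iff.mp hs with hs' | ⟨e', rfl, hs'⟩
    · have hcL : e.length < best.length := hLle e hs' hp
      have hb := hbnd e hs' hp h1len
      rw [pcStep_getD x.1 x.2 best e.length h1len hcL]
      split_ifs with hcond
      · exact le_trans (min_le_left _ _) hb
      · exact hb
    · rw [pv_cons_iff] at hp
      obtain ⟨hp', hcond⟩ := hp
      have he'L : e'.length < best.length := hLle e' hs' hp'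
      have hlen : (x :: e').length = e'.length + 1 := by simp
      by_cases he' : e' = []
      · subst he'
        have hx1 : ([x] : List (Int × Int)).length = 1 := rfl
        rw [hx1, mpre_cons]
        by_cases h1L : 1 < best.length
        · rw [pcStep_getD x.1 x.2 best 1 le_rfl h1L, if_pos (Or.inl rfl), h0]
          exact min_le_right _ _
        · have hL1 : best.length = 1 := by omega
          rw [show (1 : Nat) = best.length from hL1.symm,
            pcStep_getD_top x.1 x.2 best hne (Or.inl (by omega)),
            show best.length - 1 = 0 from by omega, h0]
          exact le_of_eq rfl
      · have hle : mpre e' ≤ x.2 := by tauto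
        have hb' : best.getD e'.length 0 ≤ mpre e' :=
          hbnd e' hs' hp' (by cases e' with | nil => exact absurd rfl he' | cons a l => simp)
        have hmx : x.1 + max 0 (best.getD e'.length 0) ≤ mpre (x :: e') := by
          rw [mpre_cons]
          exact add_le_add le_rfl (max_le_max le_rfl hb')
        by_cases hcL : e'.length + 1 < best.length
        · rw [hlen, pcStep_getD x.1 x.2 best (e'.length + 1) (by omega) hcL]
          rw [Nat.add_sub_cancel]
          rw [if_pos (Or.inr (le_trans hb' hle))]
          exact le_trans (min_le_right _ _) hmx
        · have hEq : e'.length + 1 = best.length := by omega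
          have hcnd : best.length - 1 = 0 ∨ best.getD (best.length - 1) 0 ≤ x.2 := by
            right
            rw [show best.length - 1 = e'.length from by omega]
            exact le_trans hb' hle
          rw [hlen, hEq, pcStep_getD_top x.1 x.2 best hne hcnd,
            show best.length - 1 = e'.length from by omega]
          exact hmx

lemma DPinv_dpt : ∀ t : List (Int × Int), DPinv t (dpt t) := by
  intro t
  induction t with
  | nil => exact DPinv_nil
  | cons x r ih => exact DPinv_step x r (dpt r) ih

lemma bestExt_eq_dpt (t : List (Int × Int)) : bestExt [] t + 1 = (dpt t).length := by
  obtain ⟨h0, hiff, hach, hbnd⟩ := DPinv_dpt t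
  obtain ⟨e, hs, ho, hlen⟩ := bestExt_achieve t []
  have hpv : pv e = true := (extOK_nil_iff e).mp ho
  have h1 : bestExt [] t < (dpt t).length := by
    rw [show bestExt [] t = e.length from by simpa using hlen]
    exact (hiff e.length).mpr ⟨e, hs, hpv, rfl⟩
  have hpos : 0 < (dpt t).length := (hiff 0).mpr ⟨[], List.nil_sublist _, rfl, rfl⟩
  obtain ⟨e2, hs2, hp2, hlen2⟩ := (hiff ((dpt t).length - 1)).mp (by omega)
  have h2 := bestExt_bound t [] e2 hs2 ((extOK_nil_iff e2).mpr hp2)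
  simp only [List.length_nil, Nat.zero_add] at h2
  omega

theorem pc_spec : Claim_equal_pc := by
  intro w s _ hpre
  unfold Spec_pc
  rw [pc_eq_bestExt w s hpre, pc_alt_eq w s hpre]
  have h := bestExt_eq_dpt (w.zip s)
  omega
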